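-- pv_equiv track=rewrite | github.com/roskata551/BG_Arbitrage | Total Score Scraper/betano_scraper.py | form_data
-- ===== SOURCE A (Python) =====
-- def form_data(score_odds):
--
--     dic = {}
--
--     i = 0
--     score = None
--     for item in score_odds:
--
--         i += 1
--
--         if i == 1:
--             dic[item] = []
--             score = item
--
--         elif i == 2:
--             dic[score].append(item)
--
--         elif i == 3:
--             continue
--
--         elif i == 4:
--             dic[score].append(item)
--             i = 0
--
--     return dic
-- ===== SOURCE B (Python) =====
-- def form_data(score_odds):
--     dic = {}
--     n = len(score_odds)
--     j = 0
--     while j < n: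
--         g = score_odds[j:j+4]
--         dic[g[0]] = g[1:2] + g[3:4]
--         j += 4
--     return dic
-- ===== Notes on version B (the rewrite author's own statement) =====
-- stated objective: simpler
-- what changed: Replaced the per-item counter state machine (i cycling 1..4 with a remembered score key) by a direct chunked traversal: step an index by 4, slice each 4-element group g and assign dic[g[0]] = g[1:2] + g[3:4] in one statement.
import Mathlib
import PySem

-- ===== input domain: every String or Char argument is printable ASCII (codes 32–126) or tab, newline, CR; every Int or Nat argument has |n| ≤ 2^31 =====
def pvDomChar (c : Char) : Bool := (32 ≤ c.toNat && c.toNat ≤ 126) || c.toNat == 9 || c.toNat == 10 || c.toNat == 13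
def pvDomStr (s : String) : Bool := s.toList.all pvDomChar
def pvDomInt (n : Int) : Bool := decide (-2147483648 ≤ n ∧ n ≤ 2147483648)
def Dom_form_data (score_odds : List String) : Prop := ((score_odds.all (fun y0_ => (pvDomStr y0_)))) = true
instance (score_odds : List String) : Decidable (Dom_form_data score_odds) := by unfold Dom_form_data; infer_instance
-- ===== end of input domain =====

-- B replaces A's per-item counter state machine by a chunked index traversal (slice each
-- group of 4 and assign its key/odds in one statement): simpler, same O(n) cost.

-- ===== PORT A =====
-- loop body of A: state = (dic, i, score); score = None is ported as none, and the
-- dic[score] accesses use score.getD "" — exact, since Python reads dic[score] only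
-- after i == 1 has set score (score is never None there).
def formStep (st : PySem.Dict String (List String) × Int × Option String) (item : String) :
    PySem.Dict String (List String) × Int × Option String :=
  let dic := st.1
  let i := st.2.1 + 1
  let score := st.2.2
  if i = 1 then (dic.insert item [], i, some item)
  else if i = 2 then (dic.modify (score.getD "") [] (fun l => l ++ [item]), i, score)
  else if i = 3 then (dic, i, score)
  else if i = 4 then (dic.modify (score.getD "") [] (fun l => l ++ [item]), 0, score)
  else (dic, i, score)

def form_data (score_odds : List String) : List (String × List String) :=
  (score_odds.foldl formStep (PySem.Dict.empty, 0, none)).1.items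

-- ===== PORT B =====
-- the while loop of Source B: j steps by 4; g = score_odds[j:j+4] is nonempty whenever
-- j < len(score_odds), so the match's [] arm (Python's would-be IndexError on g[0])
-- is an unreachable totality guard.
def bLoop (xs : List String) (dic : PySem.Dict String (List String)) (j : Nat) :
    PySem.Dict String (List String) :=
  if h : j < xs.length then
    let g := PySem.List.slice xs (some (j : Int)) (some ((j : Int) + 4))
    let dic' := match g with
      | [] => dic
      | k :: _ => dic.insert k (PySem.List.slice g (some 1) (some 2) ++
                                PySem.List.slice g (some 3) (some 4))
    bLoop xs dic' (j + 4)
  else dic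
termination_by xs.length - j

def form_data_alt (score_odds : List String) : List (String × List String) :=
  (bLoop score_odds PySem.Dict.empty 0).items

-- ===== PRECONDITION & SPEC =====
def Spec_form_data (score_odds : List String) (out : List (String × List String)) : Prop := out = form_data_alt score_odds
instance (score_odds : List String) (out : List (String × List String)) : Decidable (Spec_form_data score_odds out) := by unfold Spec_form_data; infer_instance

-- ===== CLAIM (what is proved, stated in full; the proofs are below) =====
def Claim_equal_form_data : Prop := ∀ (score_odds : List String), Dom_form_data score_odds → Spec_form_data score_odds (form_data score_odds)

-- ===== LEMMAS AND PROOFS =====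

-- proof-only helper: both loops compute this chunk recursion
def chunkC (dic : PySem.Dict String (List String)) : List String → PySem.Dict String (List String)
  | [] => dic
  | a :: tl => chunkC (dic.insert a (tl.take 1 ++ (tl.drop 2).take 1)) (tl.drop 3)
termination_by ys => ys.length
decreasing_by simp

theorem chunkC_nil (dic : PySem.Dict String (List String)) : chunkC dic [] = dic := by
  rw [chunkC]

theorem chunkC_cons (dic : PySem.Dict String (List String)) (a : String) (tl : List String) :
    chunkC dic (a :: tl) = chunkC (dic.insert a (tl.take 1 ++ (tl.drop 2).take 1)) (tl.drop 3) := by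
  rw [chunkC]

theorem insert_insert_self (d : PySem.Dict String (List String)) (k : String)
    (v w : List String) : (d.insert k v).insert k w = d.insert k w := by
  apply PySem.Dict.ext
  by_cases hc : d.contains k
  · rw [PySem.Dict.items_insert_of_contains _ _ hc,
        PySem.Dict.items_insert_of_contains _ _ (by simp [PySem.Dict.contains_insert_self]),
        PySem.Dict.items_insert_of_contains _ _ hc, List.map_map]
    refine List.map_congr_left (fun p _ => ?_)
    by_cases hp : p.1 = k <;> simp [Function.comp, hp]
  · have hcf : d.contains k = false := by simpa using hc
    rw [PySem.Dict.items_insert_of_not_contains _ _ hcf,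
        PySem.Dict.items_insert_of_contains _ _ (by simp [PySem.Dict.contains_insert_self]),
        PySem.Dict.items_insert_of_not_contains _ _ hcf, List.map_append]
    have hk : ∀ p ∈ d.items, p.1 ≠ k := by
      intro p hp hpk
      exact absurd ((PySem.Dict.contains_iff_mem_keys _ _).mpr
        (hpk ▸ PySem.Dict.mem_keys_of_mem_items _ hp)) (by simpa using hc)
    have hmap : d.items.map (fun p => if p.1 = k then (k, w) else p) = d.items := by
      refine List.map_congr_left (fun p hp => ?_) |>.trans d.items.map_id
      simp [hk p hp]
    simp [hmap]

theorem modify_insert (d : PySem.Dict String (List String)) (k : String)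
    (v : List String) (f : List String → List String) :
    (d.insert k v).modify k [] f = d.insert k (f v) := by
  rw [PySem.Dict.modify, PySem.Dict.getD_insert_self, insert_insert_self]

theorem afold_eq_chunkC (n : Nat) (xs : List String) (h : xs.length ≤ n)
    (dic : PySem.Dict String (List String)) (s : Option String) :
    (List.foldl formStep (dic, 0, s) xs).1 = chunkC dic xs := by
  induction n generalizing xs dic s with
  | zero =>
    match xs with
    | [] => simp [chunkC_nil]
    | _ :: _ => simp at h
  | succ n ih =>
    match xs with
    | [] => simp [chunkC_nil]
    | [a] => simp [chunkC_nil, chunkC_cons, formStep]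
    | [a, b] => simp [chunkC_nil, chunkC_cons, formStep, modify_insert]
    | [a, b, c] => simp [chunkC_nil, chunkC_cons, formStep, modify_insert]
    | a :: b :: c :: d :: tl =>
      have : (List.foldl formStep (dic, 0, s) (a :: b :: c :: d :: tl))
          = List.foldl formStep (dic.insert a [b, d], 0, some a) tl := by
        simp [List.foldl, formStep, modify_insert]
      rw [this, ih tl (by simp at h ⊢; omega)]
      simp [chunkC_cons]

theorem bLoop_eq_chunkC (n : Nat) (xs : List String) (j : Nat) (h : xs.length - j ≤ n)
    (dic : PySem.Dict String (List String)) :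
    bLoop xs dic j = chunkC dic (xs.drop j) := by
  induction n generalizing j dic with
  | zero =>
    rw [bLoop]
    have hj : ¬ j < xs.length := by omega
    have hd : List.drop j xs = [] := List.drop_eq_nil_of_le (by omega)
    simp [hj, hd, chunkC_nil]
  | succ n ih =>
    rw [bLoop]
    by_cases hj : j < xs.length
    · simp only [hj, dite_true]
      have hg : PySem.List.slice xs (some (j : Int)) (some ((j : Int) + 4))
          = (xs.drop j).take 4 := by
        have := PySem.List.slice_natCast_add xs j 4
        simpa using this
      obtain ⟨a, tl, hd⟩ : ∃ a tl, xs.drop j = a :: tl := by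
        cases hxd : xs.drop j with
        | nil =>
          exfalso
          have := List.length_drop (l := xs) (i := j)
          rw [hxd] at this; simp at this; omega
        | cons a tl => exact ⟨a, tl, rfl⟩
      rw [hg, hd, List.take_succ_cons]
      have h12 : PySem.List.slice (a :: tl.take 3) (some 1) (some 2) = tl.take 1 := by
        rw [PySem.List.slice_toNat _ (by norm_num) (by norm_num)]
        simp [List.take_take]
      have h34 : PySem.List.slice (a :: tl.take 3) (some 3) (some 4) = (tl.drop 2).take 1 := by
        rw [PySem.List.slice_toNat _ (by norm_num) (by norm_num)]
        simp [List.drop_take]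
      simp only [h12, h34]
      rw [ih (j + 4) (by omega), chunkC_cons]
      have hdd : List.drop (j + 4) xs = tl.drop 3 := by
        have h4 : List.drop (j + 4) xs = (List.drop j xs).drop 4 := by
          rw [List.drop_drop]
        rw [h4, hd]
        simp
      rw [hdd]
    · have hd : List.drop j xs = [] := List.drop_eq_nil_of_le (by omega)
      simp [hj, hd, chunkC_nil]

-- ===== VERDICT (by name: the statement is the Claim_ definition above) =====
theorem form_data_spec : Claim_equal_form_data := by
  intro xs _
  unfold Spec_form_data form_data form_data_alt
  rw [afold_eq_chunkC xs.length xs le_rfl, bLoop_eq_chunkC xs.length xs 0 (by omega)]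
  simp
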